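-- pv_equiv track=rewrite | github.com/OpenThis-Now/CSV-Mapping | backend/app/match_engine/scoring.py | are_similar_acids
-- ===== SOURCE A (Python) =====
-- def are_similar_acids(chem1: str, chem2: str) -> bool:
--     """Check if two acid names are chemically similar"""
--     # Map common acid variations
--     acid_families = {
--         'folic': ['fol', 'folate'],
--         'oleic': ['ole', 'oleat'],
--         'citric': ['cit', 'citrat'],
--         'acetic': ['acet', 'acetat'],
--         'formic': ['form', 'format'],
--         'pantothenic': ['panto', 'pantothenat'],
--     }
--
--     for family, variations in acid_families.items():
--         if (chem1 in variations or chem2 in variations) and (chem1 == family or chem2 == family):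
--             return True
--         if chem1 in variations and chem2 in variations:
--             return True
--
--     return False
-- ===== SOURCE B (Python) =====
-- _ACID_FAMILIES = {
--     'folic': ['fol', 'folate'],
--     'oleic': ['ole', 'oleat'],
--     'citric': ['cit', 'citrat'],
--     'acetic': ['acet', 'acetat'],
--     'formic': ['form', 'format'],
--     'pantothenic': ['panto', 'pantothenat'],
-- }
--
-- _INDEX = {}
-- for _fam, _vars in _ACID_FAMILIES.items():
--     _INDEX[_fam] = _fam
--     for _v in _vars:
--         _INDEX[_v] = _fam
--
-- _BARE = set(_ACID_FAMILIES)
--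
--
-- def are_similar_acids(chem1: str, chem2: str) -> bool:
--     fam1 = _INDEX.get(chem1)
--     return (fam1 is not None
--             and fam1 == _INDEX.get(chem2)
--             and not (chem1 in _BARE and chem2 in _BARE))
-- ===== Notes on version B (the rewrite author's own statement) =====
-- stated objective: idiomatic
-- what changed: Replaces the loop over families with repeated membership tests by a reverse index (variation/family -> family) and a bare-family-name set built once at module level, then decides via two direct lookups plus a 'not both bare names' guard.
import Mathlib
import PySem

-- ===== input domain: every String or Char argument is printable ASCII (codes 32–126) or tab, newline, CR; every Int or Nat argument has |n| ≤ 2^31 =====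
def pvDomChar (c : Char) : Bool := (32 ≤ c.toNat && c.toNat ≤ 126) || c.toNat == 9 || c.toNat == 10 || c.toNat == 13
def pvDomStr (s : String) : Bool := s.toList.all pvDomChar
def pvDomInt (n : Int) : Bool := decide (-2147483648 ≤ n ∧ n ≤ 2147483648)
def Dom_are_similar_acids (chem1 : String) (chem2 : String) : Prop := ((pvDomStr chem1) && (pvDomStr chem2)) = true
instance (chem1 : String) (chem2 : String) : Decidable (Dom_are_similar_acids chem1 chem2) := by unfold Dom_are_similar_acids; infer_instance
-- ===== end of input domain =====

-- B replaces A's loop over families (with repeated membership tests) by a reverse index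
-- built once (variation/family → family) plus two direct lookups; objective: idiomatic.

-- ===== PORT A =====
def acidFamilies : List (String × List String) :=
  [("folic", ["fol", "folate"]),
   ("oleic", ["ole", "oleat"]),
   ("citric", ["cit", "citrat"]),
   ("acetic", ["acet", "acetat"]),
   ("formic", ["form", "format"]),
   ("pantothenic", ["panto", "pantothenat"])]

def areSimLoop (chem1 chem2 : String) : List (String × List String) → Bool
  | [] => false
  | (family, variations) :: rest =>
    if (variations.contains chem1 || variations.contains chem2)
        && (chem1 == family || chem2 == family) then true
    else if variations.contains chem1 && variations.contains chem2 then true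
    else areSimLoop chem1 chem2 rest

def are_similar_acids (chem1 : String) (chem2 : String) : Bool :=
  areSimLoop chem1 chem2 acidFamilies

-- ===== PORT B =====
def acidFamiliesB : List (String × List String) :=
  [("folic", ["fol", "folate"]),
   ("oleic", ["ole", "oleat"]),
   ("citric", ["cit", "citrat"]),
   ("acetic", ["acet", "acetat"]),
   ("formic", ["form", "format"]),
   ("pantothenic", ["panto", "pantothenat"])]

-- the reverse index _INDEX built by Source B's module-level loop
def acidIndex : PySem.Dict String String :=
  acidFamiliesB.foldl
    (fun d p => p.2.foldl (fun d v => d.insert v p.1) (d.insert p.1 p.1))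
    PySem.Dict.empty

-- _BARE = set(_ACID_FAMILIES)
def bareAcids : PySem.Set String := PySem.Set.ofList (acidFamiliesB.map Prod.fst)

def are_similar_acids_alt (chem1 : String) (chem2 : String) : Bool :=
  match acidIndex.get? chem1 with
  | none => false
  | some f1 =>
      (acidIndex.get? chem2 == some f1)
        && !(PySem.Set.contains bareAcids chem1 && PySem.Set.contains bareAcids chem2)

-- ===== PRECONDITION & SPEC =====
def Spec_are_similar_acids (chem1 : String) (chem2 : String) (out : Bool) : Prop := out = are_similar_acids_alt chem1 chem2
instance (chem1 : String) (chem2 : String) (out : Bool) : Decidable (Spec_are_similar_acids chem1 chem2 out) := by unfold Spec_are_similar_acids; infer_instance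

-- ===== CLAIM (what is proved, stated in full; the proofs are below) =====
def Claim_equal_are_similar_acids : Prop := ∀ (chem1 : String) (chem2 : String), Dom_are_similar_acids chem1 chem2 → Spec_are_similar_acids chem1 chem2 (are_similar_acids chem1 chem2)

-- ===== LEMMAS AND PROOFS =====

-- the 18 strings either program ever compares against
def acidKeys : List String :=
  ["folic", "oleic", "citric", "acetic", "formic", "pantothenic",
   "fol", "folate", "ole", "oleat", "cit", "citrat",
   "acet", "acetat", "form", "format", "panto", "pantothenat"]

lemma acidIndex_get?_none {c : String} (h : c ∉ acidKeys) : acidIndex.get? c = none := by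
  have hk : acidIndex.keys =
      ["folic", "fol", "folate", "oleic", "ole", "oleat", "citric", "cit", "citrat",
       "acetic", "acet", "acetat", "formic", "form", "format",
       "pantothenic", "panto", "pantothenat"] := by decide
  rw [PySem.Dict.get?_eq_none_iff_not_mem_keys, hk]
  simp only [acidKeys, List.mem_cons, List.not_mem_nil, or_false, not_or] at h ⊢
  tauto

lemma alt_none_right (c1 c2 : String) (h : acidIndex.get? c2 = none) :
    are_similar_acids_alt c1 c2 = false := by
  unfold are_similar_acids_alt
  cases acidIndex.get? c1 <;> simp [h]

lemma alt_none_left (c1 c2 : String) (h : acidIndex.get? c1 = none) :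
    are_similar_acids_alt c1 c2 = false := by
  unfold are_similar_acids_alt
  rw [h]

theorem are_similar_acids_eq (chem1 chem2 : String) :
    are_similar_acids chem1 chem2 = are_similar_acids_alt chem1 chem2 := by
  by_cases h1 : chem1 ∈ acidKeys <;> by_cases h2 : chem2 ∈ acidKeys
  · simp only [acidKeys] at h1 h2
    fin_cases h1 <;> fin_cases h2 <;> decide
  · have hb : ∀ c1, are_similar_acids_alt c1 chem2 = false :=
      fun c1 => alt_none_right c1 chem2 (acidIndex_get?_none h2)
    have h2' := h2
    simp only [acidKeys, List.mem_cons, List.not_mem_nil, or_false, not_or] at h2'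
    simp only [acidKeys] at h1
    fin_cases h1 <;> simp [are_similar_acids, areSimLoop, acidFamilies, hb, h2']
  · have hb : ∀ c2, are_similar_acids_alt chem1 c2 = false :=
      fun c2 => alt_none_left chem1 c2 (acidIndex_get?_none h1)
    have h1' := h1
    simp only [acidKeys, List.mem_cons, List.not_mem_nil, or_false, not_or] at h1'
    simp only [acidKeys] at h2
    fin_cases h2 <;> simp [are_similar_acids, areSimLoop, acidFamilies, hb, h1']
  · have hb := alt_none_left chem1 chem2 (acidIndex_get?_none h1)
    have h1' := h1
    have h2' := h2
    simp only [acidKeys, List.mem_cons, List.not_mem_nil, or_false, not_or] at h1' h2'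
    simp [are_similar_acids, areSimLoop, acidFamilies, hb, h1', h2']

-- ===== VERDICT (by name: the statement is the Claim_ definition above) =====
theorem are_similar_acids_spec : Claim_equal_are_similar_acids := by
  intro c1 c2 _
  unfold Spec_are_similar_acids
  exact are_similar_acids_eq c1 c2
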